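-- pv_equiv track=rewrite | github.com/AlkanCH/pp1 | 13-Test3/p4.py | f
-- ===== SOURCE A (Python) =====
-- def f(d):
--     cars = {}
--     for entry in d:
--         if entry[1] == "in":
--             cars[entry[0]] = True
--         elif entry[1] == "out":
--             cars[entry[0]] = False
--     return sorted([key for key, value in cars.items() if value])
-- ===== SOURCE B (Python) =====
-- def f(d):
--     decided = set()
--     inside = []
--     for car, action in reversed(d):
--         if action in ("in", "out") and car not in decided:
--             decided.add(car)
--             if action == "in":
--                 inside.append(car)
--     return sorted(inside)
-- ===== Notes on version B (the rewrite author's own statement) =====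
-- stated objective: alternative
-- what changed: B scans the log backwards once, deciding each car by its first relevant event seen in reverse (= its last event overall) and never revisiting a decided car, instead of A's forward pass overwriting a car->bool dict and then filtering it.
import Mathlib
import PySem

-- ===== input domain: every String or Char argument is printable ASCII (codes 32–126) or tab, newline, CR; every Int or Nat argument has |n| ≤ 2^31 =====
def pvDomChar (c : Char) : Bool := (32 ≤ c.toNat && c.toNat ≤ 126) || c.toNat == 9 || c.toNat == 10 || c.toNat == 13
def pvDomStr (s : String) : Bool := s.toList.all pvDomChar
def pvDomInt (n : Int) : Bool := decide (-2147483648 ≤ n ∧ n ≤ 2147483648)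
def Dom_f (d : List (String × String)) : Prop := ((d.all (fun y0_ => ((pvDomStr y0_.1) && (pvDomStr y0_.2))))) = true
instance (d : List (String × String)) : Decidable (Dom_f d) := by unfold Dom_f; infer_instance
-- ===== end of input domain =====

-- B scans the log backwards once, deciding each car by its last relevant event; objective: alternative (same cost, different algorithm).

-- ===== PORT A =====
-- forward pass overwriting a car->bool dict, then sorted filter of the true keys
def f (d : List (String × String)) : List String :=
  PySem.List.sorted
    ((((d.foldl (fun cars entry =>
        if entry.2 == "in" then cars.insert entry.1 true
        else if entry.2 == "out" then cars.insert entry.1 false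
        else cars) (PySem.Dict.empty : PySem.Dict String Bool)).items.filter
          (fun kv => kv.2)).map (fun kv => kv.1)))
    (fun x => x)

-- ===== PORT B =====
-- for car, action in reversed(d): first relevant event seen (in reverse) decides the car
def f_alt (d : List (String × String)) : List String :=
  PySem.List.sorted
    ((d.reverse.foldl (fun (st : PySem.Set String × List String) e =>
        if ((e.2 == "in" || e.2 == "out") && !(PySem.Set.contains st.1 e.1)) then
          (PySem.Set.add st.1 e.1, if e.2 == "in" then st.2 ++ [e.1] else st.2)
        else st) ((PySem.Set.empty : PySem.Set String), ([] : List String))).2)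
    (fun x => x)

-- ===== PRECONDITION & SPEC =====
def Spec_f (d : List (String × String)) (out : List String) : Prop := out = f_alt d
instance (d : List (String × String)) (out : List String) : Decidable (Spec_f d out) := by unfold Spec_f; infer_instance

-- ===== CLAIM (what is proved, stated in full; the proofs are below) =====
def Claim_equal_f : Prop := ∀ (d : List (String × String)), Dom_f d → Spec_f d (f d)

-- ===== LEMMAS AND PROOFS =====

-- action of the last relevant ("in"/"out") entry for key k, as a Bool (true = "in")
def pvLastRel (k : String) : List (String × String) → Option Bool
  | [] => none
  | e :: rest => match pvLastRel k rest with
      | some b => some b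
      | none => if e.1 == k && (e.2 == "in" || e.2 == "out") then some (e.2 == "in") else none

-- action of the first relevant entry for key k
def pvFirstRel (k : String) : List (String × String) → Option Bool
  | [] => none
  | e :: rest => if e.1 == k && (e.2 == "in" || e.2 == "out") then some (e.2 == "in") else pvFirstRel k rest

theorem pvFirstRel_append (k : String) (a b : List (String × String)) :
    pvFirstRel k (a ++ b) = match pvFirstRel k a with
      | some x => some x
      | none => pvFirstRel k b := by
  induction a with
  | nil => simp [pvFirstRel]
  | cons e rest ih =>
    simp only [List.cons_append, pvFirstRel]
    by_cases h : (e.1 == k && (e.2 == "in" || e.2 == "out")) = true <;> simp [h, ih]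

theorem pvFirstRel_reverse (k : String) (l : List (String × String)) :
    pvFirstRel k l.reverse = pvLastRel k l := by
  induction l with
  | nil => rfl
  | cons e rest ih =>
    rw [List.reverse_cons, pvFirstRel_append, ih]
    cases h : pvLastRel k rest <;> simp [pvLastRel, pvFirstRel, h]

-- A's dict fold: lookup is the last relevant action, else the initial dict's value
theorem pvA_get (d : List (String × String)) (c : PySem.Dict String Bool) (k : String) :
    (d.foldl (fun cars entry =>
        if entry.2 == "in" then cars.insert entry.1 true
        else if entry.2 == "out" then cars.insert entry.1 false
        else cars) c).get? k = match pvLastRel k d with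
      | some b => some b
      | none => c.get? k := by
  induction d generalizing c with
  | nil => simp [pvLastRel]
  | cons e rest ih =>
    simp only [List.foldl_cons, ih, pvLastRel]
    cases hlr : pvLastRel k rest with
    | some b => rfl
    | none =>
      by_cases h1 : (e.2 == "in") = true
      · have h2 : e.2 = "in" := by simpa using h1
        rw [if_pos h1, PySem.Dict.get?_insert]
        by_cases hk : k = e.1
        · simp [hk, h2]
        · have hk2 : ¬ e.1 = k := fun h => hk h.symm
          simp [hk, hk2, h2]
      · rw [if_neg h1]
        by_cases h2 : (e.2 == "out") = true
        · have h3 : e.2 = "out" := by simpa using h2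
          rw [if_pos h2, PySem.Dict.get?_insert]
          by_cases hk : k = e.1
          · simp [hk, h3]
          · have hk2 : ¬ e.1 = k := fun h => hk h.symm
            simp [hk, hk2, h3]
        · rw [if_neg h2]
          have : (e.1 == k && (e.2 == "in" || e.2 == "out")) = false := by
            simp only [Bool.and_eq_false_iff, Bool.or_eq_false_iff]
            right; exact ⟨by simpa using h1, by simpa using h2⟩
          simp [this]

theorem pvA_nodup_keys (d : List (String × String)) (c : PySem.Dict String Bool)
    (h : c.keys.Nodup) :
    (d.foldl (fun cars entry =>
        if entry.2 == "in" then cars.insert entry.1 true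
        else if entry.2 == "out" then cars.insert entry.1 false
        else cars) c).keys.Nodup := by
  induction d generalizing c with
  | nil => exact h
  | cons e rest ih =>
    simp only [List.foldl_cons]
    split_ifs <;>
      first
        | exact ih _ (PySem.Dict.nodup_keys_insert _ _ _ h)
        | exact ih _ h

-- B's reverse-scan invariant: the appended list stays Nodup, sits inside `decided`,
-- and its membership is first-relevant-action = "in"
theorem pvB_inv (l : List (String × String)) (st : PySem.Set String × List String)
    (h1 : st.1.Nodup) (h2 : st.2.Nodup) (hsub : ∀ x ∈ st.2, x ∈ st.1) :
    (l.foldl (fun (st : PySem.Set String × List String) e =>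
        if ((e.2 == "in" || e.2 == "out") && !(PySem.Set.contains st.1 e.1)) then
          (PySem.Set.add st.1 e.1, if e.2 == "in" then st.2 ++ [e.1] else st.2)
        else st) st).2.Nodup ∧
    (∀ x, x ∈ (l.foldl (fun (st : PySem.Set String × List String) e =>
        if ((e.2 == "in" || e.2 == "out") && !(PySem.Set.contains st.1 e.1)) then
          (PySem.Set.add st.1 e.1, if e.2 == "in" then st.2 ++ [e.1] else st.2)
        else st) st).2 ↔ x ∈ st.2 ∨ (x ∉ st.1 ∧ pvFirstRel x l = some true)) := by
  induction l generalizing st with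
  | nil => exact ⟨h2, by intro x; simp [pvFirstRel]⟩
  | cons e rest ih =>
    simp only [List.foldl_cons]
    by_cases hc : ((e.2 == "in" || e.2 == "out") && !(PySem.Set.contains st.1 e.1)) = true
    · rw [if_pos hc]
      obtain ⟨hrel, hnc⟩ := Bool.and_eq_true_iff.mp hc
      have hne1 : e.1 ∉ st.1 := by simpa using hnc
      have hne2 : e.1 ∉ st.2 := fun h => hne1 (hsub _ h)
      set st' : PySem.Set String × List String :=
        (PySem.Set.add st.1 e.1, if e.2 == "in" then st.2 ++ [e.1] else st.2) with hst'
      have h1' : st'.1.Nodup := PySem.Set.nodup_add _ _ h1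
      have h2' : st'.2.Nodup := by
        simp only [hst']
        split_ifs with hin
        · rw [List.nodup_append]
          refine ⟨h2, List.nodup_singleton _, ?_⟩
          simpa [List.disjoint_singleton] using fun a ha (h : a = e.1) => hne2 (h ▸ ha)
        · exact h2
      have hsub' : ∀ x ∈ st'.2, x ∈ st'.1 := by
        intro x hx
        simp only [hst'] at hx ⊢
        rw [PySem.Set.mem_add]
        split_ifs at hx with hin
        · rcases List.mem_append.mp hx with h | h
          · exact Or.inl (hsub _ h)
          · exact Or.inr (by simpa using h)
        · exact Or.inl (hsub _ hx)
      obtain ⟨hnd, hmem⟩ := ih st' h1' h2' hsub'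
      refine ⟨hnd, fun x => ?_⟩
      rw [hmem x]
      by_cases hx : x = e.1
      · have hrelx : (e.1 == x && (e.2 == "in" || e.2 == "out")) = true := by
          simp [hx, hrel]
        have hfr : pvFirstRel x (e :: rest) = some (e.2 == "in") := by
          simp [pvFirstRel, hrelx]
        simp only [hst', hfr, PySem.Set.mem_add]
        by_cases hin : (e.2 == "in") = true <;>
          simp [hin, hx, hne1, hne2]
      · have hfr : pvFirstRel x (e :: rest) = pvFirstRel x rest := by
          have : (e.1 == x) = false := by simpa using fun h => hx h.symm
          simp [pvFirstRel, this]
        have hmemadd : (x ∈ PySem.Set.add st.1 e.1) ↔ x ∈ st.1 := by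
          rw [PySem.Set.mem_add]; simp [hx]
        simp only [hst', hfr]
        split_ifs with hin <;> simp [hmemadd, hx]
    · rw [if_neg hc]
      obtain ⟨hnd, hmem⟩ := ih st h1 h2 hsub
      refine ⟨hnd, fun x => ?_⟩
      rw [hmem x]
      by_cases hrelx : (e.1 == x && (e.2 == "in" || e.2 == "out")) = true
      · obtain ⟨hx, hrel⟩ := Bool.and_eq_true_iff.mp hrelx
        have hx' : e.1 = x := by simpa using hx
        have hin1 : x ∈ st.1 := by
          have := Bool.and_eq_false_iff.mp (Bool.not_eq_true _ |>.mp hc)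
          rcases this with h | h
          · exact absurd hrel (by simp [h])
          · rw [Bool.not_eq_false'] at h
            exact hx' ▸ (by simpa using h)
        have hfr : pvFirstRel x (e :: rest) = some (e.2 == "in") := by
          simp [pvFirstRel, hrelx]
        simp [hfr, hin1]
      · have hfr : pvFirstRel x (e :: rest) = pvFirstRel x rest := by
          simp only [pvFirstRel]
          rw [if_neg hrelx]
        rw [hfr]

theorem f_eq_f_alt (d : List (String × String)) : f d = f_alt d := by
  unfold f f_alt
  set c := d.foldl (fun cars entry =>
        if entry.2 == "in" then cars.insert entry.1 true
        else if entry.2 == "out" then cars.insert entry.1 false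
        else cars) (PySem.Dict.empty : PySem.Dict String Bool) with hc
  set s := (d.reverse.foldl (fun (st : PySem.Set String × List String) e =>
        if ((e.2 == "in" || e.2 == "out") && !(PySem.Set.contains st.1 e.1)) then
          (PySem.Set.add st.1 e.1, if e.2 == "in" then st.2 ++ [e.1] else st.2)
        else st) ((PySem.Set.empty : PySem.Set String), ([] : List String))).2 with hs
  have hndk : c.keys.Nodup := pvA_nodup_keys d _ PySem.Dict.nodup_keys_empty
  obtain ⟨hnds, hmems⟩ := pvB_inv d.reverse (PySem.Set.empty, ([] : List String))
    (by simp [PySem.Set.empty]) (by simp) (by simp)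
  apply PySem.List.sorted_eq_sorted_of_perm _ _ _ (fun a b h => h)
  have hL : ((c.items.filter (fun kv => kv.2)).map (fun kv => kv.1)).Nodup := by
    have hsubl : ((c.items.filter (fun kv => kv.2)).map (fun kv => kv.1)).Sublist c.keys := by
      simpa [PySem.Dict.keys] using
        (List.filter_sublist (l := c.items) (p := fun kv => kv.2)).map (fun kv => kv.1)
    exact hndk.sublist hsubl
  rw [List.perm_ext_iff_of_nodup hL hnds]
  intro k
  have hA : k ∈ ((c.items.filter (fun kv => kv.2)).map (fun kv => kv.1)) ↔
      c.get? k = some true := by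
    rw [PySem.Dict.get?_eq_some_iff_mem_items _ _ _ hndk]
    simp only [List.mem_map]
    constructor
    · rintro ⟨⟨k', b⟩, hmf, rfl⟩
      rw [List.mem_filter] at hmf
      obtain ⟨hmi, hb⟩ := hmf
      simp only at hb
      rwa [hb] at hmi
    · intro h
      exact ⟨(k, true), List.mem_filter.mpr ⟨h, rfl⟩, rfl⟩
  rw [hA, hc, pvA_get, hmems k, pvFirstRel_reverse]
  cases h : pvLastRel k d with
  | none => simp [PySem.Dict.get?_empty, PySem.Set.empty]
  | some b => cases b <;> simp [PySem.Set.empty]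

-- ===== VERDICT (by name: the statement is the Claim_ definition above) =====
theorem f_spec : Claim_equal_f := by
  intro d _
  exact f_eq_f_alt d
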